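-- pv_equiv track=rewrite | github.com/aaron031291/grace-3.1- | backend/security/api_security/api_keys.py | _match_endpoint
-- ===== SOURCE A (Python) =====
-- from typing import Optional, Dict, Any, List, Set
--
-- def _match_endpoint(endpoint: str, allowed: Set[str]) -> bool:
--     """Check if an endpoint matches allowed patterns."""
--     for pattern in allowed:
--         if pattern == "*":
--             return True
--         if pattern.endswith("*"):
--             if endpoint.startswith(pattern[:-1]):
--                 return True
--         elif pattern == endpoint:
--             return True
--     return False
-- ===== SOURCE B (Python) =====
-- def _glob(pattern: str, text: str) -> bool:
--     """Char-by-char matcher: a trailing (or lone) '*' matches any remainder;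
--     otherwise characters must match literally in lockstep."""
--     if pattern == "*":
--         return True
--     if not pattern:
--         return not text
--     if not text:
--         return False
--     return pattern[0] == text[0] and _glob(pattern[1:], text[1:])
--
-- def _match_endpoint(endpoint: str, allowed) -> bool:
--     """Check if an endpoint matches allowed patterns."""
--     return any(_glob(p, endpoint) for p in allowed)
-- ===== Notes on version B (the rewrite author's own statement) =====
-- stated objective: alternative
-- what changed: Replaced the per-pattern string-method tests (==, endswith('*'), startswith(pattern[:-1])) by a single recursive character-by-character matcher _glob that walks pattern and endpoint in lockstep, treating only a lone/trailing '*' as a wildcard; the loop becomes an any() over this matcher.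
import Mathlib
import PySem

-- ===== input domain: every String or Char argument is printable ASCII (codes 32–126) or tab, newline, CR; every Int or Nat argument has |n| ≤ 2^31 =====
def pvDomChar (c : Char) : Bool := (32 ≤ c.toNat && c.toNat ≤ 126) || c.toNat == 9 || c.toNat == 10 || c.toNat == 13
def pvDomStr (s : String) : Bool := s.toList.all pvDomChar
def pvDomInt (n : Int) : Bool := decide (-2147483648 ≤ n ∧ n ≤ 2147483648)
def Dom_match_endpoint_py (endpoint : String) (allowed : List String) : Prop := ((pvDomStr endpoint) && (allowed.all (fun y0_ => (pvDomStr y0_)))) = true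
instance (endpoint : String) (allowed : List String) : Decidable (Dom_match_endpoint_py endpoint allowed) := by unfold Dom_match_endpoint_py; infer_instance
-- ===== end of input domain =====

-- One honest line: B replaces A's three string-method tests per pattern by a single
-- character-by-character recursive matcher (lone/trailing '*' matches any remainder);
-- an alternative algorithm of the same cost.

-- ===== PORT A =====
-- the for-loop of _match_endpoint, branch for branch
def matchEndpointLoop (endpoint : String) : List String → Bool
  | [] => false
  | p :: rest =>
    if p = "*" then true
    else if PySem.Str.endswith p "*" then
      (if PySem.Str.startswith endpoint (PySem.Str.slice p none (some (-1))) then true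
       else matchEndpointLoop endpoint rest)
    else if p = endpoint then true
    else matchEndpointLoop endpoint rest

def match_endpoint_py (endpoint : String) (allowed : List String) : Bool :=
  matchEndpointLoop endpoint allowed

-- ===== PORT B =====
-- _glob from Source B: lockstep character recursion over pattern and text
def globChars (p t : List Char) : Bool :=
  if p = ['*'] then true
  else match p, t with
    | [], t => t.isEmpty
    | _ :: _, [] => false
    | c :: p', d :: t' => c == d && globChars p' t' 

def match_endpoint_py_alt (endpoint : String) (allowed : List String) : Bool :=
  allowed.any (fun p => globChars p.toList endpoint.toList)

-- ===== PRECONDITION & SPEC =====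
def Spec_match_endpoint_py (endpoint : String) (allowed : List String) (out : Bool) : Prop := out = match_endpoint_py_alt endpoint allowed
instance (endpoint : String) (allowed : List String) (out : Bool) : Decidable (Spec_match_endpoint_py endpoint allowed out) := by unfold Spec_match_endpoint_py; infer_instance

-- ===== CLAIM (what is proved, stated in full; the proofs are below) =====
def Claim_equal_match_endpoint_py : Prop := ∀ (endpoint : String) (allowed : List String), Dom_match_endpoint_py endpoint allowed → Spec_match_endpoint_py endpoint allowed (match_endpoint_py endpoint allowed)

-- ===== LEMMAS AND PROOFS =====

-- Chars.startswith / endswith as decidable propositions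
theorem pv_sw (s p : List Char) : PySem.Chars.startswith s p = decide (p <+: s) := by
  by_cases h : p <+: s
  · simp [h, (PySem.Chars.startswith_iff _ _).mpr h]
  · simp only [h, decide_false]
    rw [Bool.eq_false_iff]
    intro hh
    exact h ((PySem.Chars.startswith_iff _ _).mp hh)

theorem pv_ew (s p : List Char) : PySem.Chars.endswith s p = decide (p <:+ s) := by
  by_cases h : p <:+ s
  · simp [h, (PySem.Chars.endswith_iff _ _).mpr h]
  · simp only [h, decide_false]
    rw [Bool.eq_false_iff]
    intro hh
    exact h ((PySem.Chars.endswith_iff _ _).mp hh)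

-- a singleton suffix of a cons with nonempty tail is a suffix of the tail
theorem pv_singleton_suffix_cons (a c : Char) (ps : List Char) (h : ps ≠ []) :
    ([a] <:+ c :: ps) ↔ ([a] <:+ ps) := by
  rw [List.suffix_cons_iff]
  constructor
  · rintro (he | hs)
    · cases ps <;> simp_all
    · exact hs
  · exact Or.inr

-- the recursive matcher, characterized as a proposition
theorem pv_glob_iff (p e : List Char) :
    globChars p e = true ↔ ((['*'] <:+ p ∧ p.dropLast <+: e) ∨ p = e) := by
  induction p generalizing e with
  | nil => cases e <;> simp [globChars]
  | cons c ps ih =>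
    by_cases hp : (c :: ps : List Char) = ['*']
    · rw [hp, globChars.eq_def]; simp
    · cases e with
      | nil =>
        simp only [globChars, hp, if_false]
        cases ps with
        | nil =>
          have hc : c ≠ '*' := by intro h; exact hp (by rw [h])
          simp [List.suffix_cons_iff]
          exact fun h => hc h.symm
        | cons q qs => simp
      | cons d es =>
        have hv : globChars (c :: ps) (d :: es) = (c == d && globChars ps es) := by
          simp [globChars, hp]
        rw [hv]
        simp only [Bool.and_eq_true, beq_iff_eq, ih]
        cases ps with
        | nil =>
          have hc : c ≠ '*' := by intro h; exact hp (by rw [h])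
          constructor
          · rintro ⟨rfl, (⟨h1, _⟩ | rfl)⟩
            · exact absurd (List.suffix_nil.mp h1) (by simp)
            · exact Or.inr rfl
          · rintro (⟨h1, _⟩ | h2)
            · rw [List.suffix_cons_iff] at h1
              rcases h1 with h1 | h1
              · exact absurd (show c = '*' by simpa using h1.symm) hc
              · exact absurd (List.suffix_nil.mp h1) (by simp)
            · injection h2 with hcd hes
              exact ⟨hcd, Or.inr hes⟩
        | cons q qs =>
          rw [pv_singleton_suffix_cons '*' c (q :: qs) (by simp)]
          have hdl : ((c :: q :: qs : List Char)).dropLast = c :: (q :: qs).dropLast := rfl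
          rw [hdl]
          constructor
          · rintro ⟨rfl, (⟨h1, h2⟩ | rfl)⟩
            · exact Or.inl ⟨h1, List.cons_prefix_cons.mpr ⟨rfl, h2⟩⟩
            · exact Or.inr rfl
          · rintro (⟨h1, h2⟩ | h2)
            · have h3 := List.cons_prefix_cons.mp h2
              exact ⟨h3.1, Or.inl ⟨h1, h3.2⟩⟩
            · injection h2 with hcd hes
              exact ⟨hcd, Or.inr hes⟩

-- the recursive matcher equals A's per-pattern three-way test, in PySem terms
theorem pv_glob_eq (p e : List Char) :
    globChars p e =
      ((PySem.Chars.endswith p ['*'] && PySem.Chars.startswith e (PySem.List.slice p none (some (-1)))) || p == e) := by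
  rw [PySem.List.slice_to_neg_one, pv_ew, pv_sw]
  have hr : (decide (['*'] <:+ p) && decide (p.dropLast <+: e) || p == e)
      = decide ((['*'] <:+ p ∧ p.dropLast <+: e) ∨ p = e) := by
    by_cases h1 : ['*'] <:+ p <;> by_cases h2 : p.dropLast <+: e <;> by_cases h3 : p = e <;>
      simp [h1, h2, h3]
  rw [hr]
  by_cases h : ((['*'] <:+ p ∧ p.dropLast <+: e) ∨ p = e)
  · simp [h, pv_glob_iff]
  · simp only [h, decide_false]
    rw [Bool.eq_false_iff]
    intro hh
    exact h ((pv_glob_iff p e).mp hh)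

-- a list starts with itself minus its last element
theorem pv_self_start (l : List Char) :
    PySem.Chars.startswith l (PySem.List.slice l none (some (-1))) = true := by
  rw [PySem.List.slice_to_neg_one]
  simpa [PySem.Chars.startswith_iff] using l.dropLast_prefix

-- A's loop is the disjunction of the recursive matcher over the patterns
theorem pv_loop_eq (endpoint : String) (l : List String) :
    matchEndpointLoop endpoint l = l.any (fun p => globChars p.toList endpoint.toList) := by
  induction l with
  | nil => simp [matchEndpointLoop]
  | cons p rest ih =>
    rw [List.any_cons, pv_glob_eq]
    by_cases h1 : p = "*"
    · subst h1
      simp [matchEndpointLoop, PySem.Chars.endswith_iff, PySem.Chars.startswith_iff,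
        PySem.List.slice_to_neg_one]
    · by_cases h2 : PySem.Chars.endswith p.toList ['*'] = true
      · by_cases h3 : PySem.Chars.startswith endpoint.toList (PySem.List.slice p.toList none (some (-1))) = true
        · simp [matchEndpointLoop, h1, h2, h3]
        · have hpe : p.toList ≠ endpoint.toList := by
            intro hh
            rw [hh] at h3
            exact h3 (pv_self_start _)
          simp [matchEndpointLoop, h1, h2, h3, ih, hpe]
      · by_cases h4 : p = endpoint
        · subst h4; simp [matchEndpointLoop, h1, h2]
        · have hpe : p.toList ≠ endpoint.toList := by
            intro hh; exact h4 (String.toList_inj.mp hh)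
          simp [matchEndpointLoop, h1, h2, h4, hpe, ih]

-- ===== VERDICT (by name: the statement is the Claim_ definition above) =====
theorem match_endpoint_py_spec : Claim_equal_match_endpoint_py := by
  intro endpoint allowed _
  unfold Spec_match_endpoint_py match_endpoint_py match_endpoint_py_alt
  exact pv_loop_eq endpoint allowed
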